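-- pv_equiv track=rewrite | github.com/NikitaSikalov/BioinformaticsAlgorithms | tasks/task18/progma18.py | is_spectrum_consistent
-- ===== SOURCE A (Python) =====
-- from typing import Dict, List
--
-- def is_spectrum_consistent(linear_spectrum: List[int], dict_cycle_spectrum: Dict[int, int]):
--     copy_dict = dict_cycle_spectrum.copy()
--     for x in linear_spectrum:
--         if x not in copy_dict:
--             return False
--         copy_dict[x] -= 1
--         if copy_dict[x] < 0:
--             return False
--     return True
-- ===== SOURCE B (Python) =====
-- def is_spectrum_consistent(linear_spectrum, dict_cycle_spectrum):
--     counts = {}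
--     for x in linear_spectrum:
--         counts[x] = counts.get(x, 0) + 1
--     for x, c in counts.items():
--         if dict_cycle_spectrum.get(x, 0) < c:
--             return False
--     return True
-- ===== Notes on version B (the rewrite author's own statement) =====
-- stated objective: alternative
-- what changed: Replaces the decrement-a-mutable-copy pass over every occurrence with an aggregate-then-compare pass: build a frequency table of the spectrum once, then compare each distinct mass's count against the cycle-spectrum count via get(x, 0); no dict copy is made.
import Mathlib
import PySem

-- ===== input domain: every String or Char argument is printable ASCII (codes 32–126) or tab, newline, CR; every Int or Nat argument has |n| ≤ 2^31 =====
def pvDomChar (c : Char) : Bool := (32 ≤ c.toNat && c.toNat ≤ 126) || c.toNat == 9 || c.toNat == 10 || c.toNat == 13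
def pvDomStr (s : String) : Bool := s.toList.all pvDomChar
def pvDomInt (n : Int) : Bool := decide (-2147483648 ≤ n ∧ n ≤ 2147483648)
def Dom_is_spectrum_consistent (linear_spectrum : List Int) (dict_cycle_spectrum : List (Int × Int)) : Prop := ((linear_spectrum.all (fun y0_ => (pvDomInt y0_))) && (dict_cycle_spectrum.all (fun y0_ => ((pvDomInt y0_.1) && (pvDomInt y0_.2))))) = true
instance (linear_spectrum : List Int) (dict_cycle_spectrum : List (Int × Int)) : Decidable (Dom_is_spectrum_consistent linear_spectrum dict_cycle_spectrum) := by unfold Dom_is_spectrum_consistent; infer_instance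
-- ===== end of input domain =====

-- B replaces A's decrement-a-copied-dict pass over every occurrence with an aggregate-then-compare
-- pass: a frequency table of the spectrum is built once and each distinct mass's count is compared
-- against the cycle-spectrum count (alternative decomposition, no dict copy).


-- ===== PORT A =====
-- the for-loop over linear_spectrum with copy_dict as mutable state and early returns
def isSpectrumLoopA : List Int → PySem.Dict Int Int → Bool
  | [], _ => true
  | x :: rest, d =>
    if !(d.contains x) then false
    else
      let d' := d.insert x (d.getD x 0 - 1)      -- copy_dict[x] -= 1
      if d'.getD x 0 < 0 then false
      else isSpectrumLoopA rest d'

def is_spectrum_consistent (linear_spectrum : List Int) (dict_cycle_spectrum : List (Int × Int)) : Bool :=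
  isSpectrumLoopA linear_spectrum (PySem.Dict.ofList dict_cycle_spectrum)

-- ===== PORT B =====
def is_spectrum_consistent_alt (linear_spectrum : List Int) (dict_cycle_spectrum : List (Int × Int)) : Bool :=
  let dcs := PySem.Dict.ofList dict_cycle_spectrum
  let counts := linear_spectrum.foldl (fun c x => c.insert x (c.getD x 0 + 1)) PySem.Dict.empty
  counts.items.all (fun p => !(dcs.getD p.1 0 < p.2))

-- ===== PRECONDITION & SPEC =====
def Spec_is_spectrum_consistent (linear_spectrum : List Int) (dict_cycle_spectrum : List (Int × Int)) (out : Bool) : Prop := out = is_spectrum_consistent_alt linear_spectrum dict_cycle_spectrum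
instance (linear_spectrum : List Int) (dict_cycle_spectrum : List (Int × Int)) (out : Bool) : Decidable (Spec_is_spectrum_consistent linear_spectrum dict_cycle_spectrum out) := by unfold Spec_is_spectrum_consistent; infer_instance

-- ===== CLAIM (what is proved, stated in full; the proofs are below) =====
def Claim_equal_is_spectrum_consistent : Prop := ∀ (linear_spectrum : List Int) (dict_cycle_spectrum : List (Int × Int)), Dom_is_spectrum_consistent linear_spectrum dict_cycle_spectrum → Spec_is_spectrum_consistent linear_spectrum dict_cycle_spectrum (is_spectrum_consistent linear_spectrum dict_cycle_spectrum)

-- ===== LEMMAS AND PROOFS =====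

-- A's loop succeeds iff every element occurs in the dict often enough
lemma loopA_eq_true_iff (xs : List Int) (d : PySem.Dict Int Int) :
    isSpectrumLoopA xs d = true ↔ ∀ y ∈ xs, (xs.count y : Int) ≤ d.getD y 0 := by
  induction xs generalizing d with
  | nil => simp [isSpectrumLoopA]
  | cons x rest ih =>
    by_cases hc : d.contains x
    · by_cases hneg : d.getD x 0 - 1 < 0
      · rw [show isSpectrumLoopA (x :: rest) d = false from by
          simp [isSpectrumLoopA, hc, PySem.Dict.getD_insert_self, hneg]]
        simp only [Bool.false_eq_true, false_iff]
        intro h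
        have hx := h x (List.mem_cons_self ..)
        have hcnt : 1 ≤ (x :: rest).count x := List.count_pos_iff.mpr (List.mem_cons_self ..)
        omega
      · rw [show isSpectrumLoopA (x :: rest) d
              = isSpectrumLoopA rest (d.insert x (d.getD x 0 - 1)) from by
          simp [isSpectrumLoopA, hc, PySem.Dict.getD_insert_self, hneg]]
        rw [ih]
        constructor
        · intro h y hy
          by_cases hxy : y = x
          · subst hxy
            by_cases hmem : y ∈ rest
            · have := h y hmem
              rw [PySem.Dict.getD_insert_self] at this
              simp only [List.count_cons_self]
              omega
            · have : rest.count y = 0 := List.count_eq_zero.mpr hmem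
              simp only [List.count_cons_self, this]
              omega
          · rcases List.mem_cons.mp hy with h1 | h1
            · exact absurd h1 hxy
            · have := h y h1
              rw [PySem.Dict.getD_insert_of_ne _ _ _ hxy] at this
              rw [List.count_cons_of_ne (Ne.symm hxy)]
              exact this
        · intro h y hy
          by_cases hxy : y = x
          · subst hxy
            have := h y (List.mem_cons_self ..)
            rw [PySem.Dict.getD_insert_self]
            simp only [List.count_cons_self] at this
            omega
          · have := h y (List.mem_cons_of_mem _ hy)
            rw [PySem.Dict.getD_insert_of_ne _ _ _ hxy]
            rwa [List.count_cons_of_ne (Ne.symm hxy)] at this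
    · rw [show isSpectrumLoopA (x :: rest) d = false from by
        simp [isSpectrumLoopA, hc]]
      simp only [Bool.false_eq_true, false_iff]
      intro h
      have hx := h x (List.mem_cons_self ..)
      have hg : d.getD x 0 = 0 := PySem.Dict.getD_of_not_contains _ _ (by simpa using hc)
      have hcnt : 1 ≤ (x :: rest).count x := List.count_pos_iff.mpr (List.mem_cons_self ..)
      omega

-- B succeeds under exactly the same condition
lemma alt_eq_true_iff (ls : List Int) (dcs : List (Int × Int)) :
    is_spectrum_consistent_alt ls dcs = true ↔
      ∀ y ∈ ls, (ls.count y : Int) ≤ (PySem.Dict.ofList dcs).getD y 0 := by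
  unfold is_spectrum_consistent_alt
  rw [PySem.Dict.foldl_insert_getD_add_one_eq_counter, List.all_eq_true]
  simp only [PySem.Dict.items_counter, List.mem_map, PySem.Set.mem_ofList]
  constructor
  · intro h y hy
    have := h (y, (ls.count y : Int)) ⟨y, hy, rfl⟩
    simpa [not_lt] using this
  · rintro h p ⟨y, hy, rfl⟩
    simpa [not_lt] using h y hy

-- ===== VERDICT (by name: the statement is the Claim_ definition above) =====
theorem is_spectrum_consistent_spec : Claim_equal_is_spectrum_consistent := by
  intro ls dcs _
  unfold Spec_is_spectrum_consistent is_spectrum_consistent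
  rw [Bool.eq_iff_iff, loopA_eq_true_iff, alt_eq_true_iff]
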